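-- pv_equiv track=rewrite | github.com/KrtiT/automated-phishing-detection-public | code/burst_test.py | expand_payloads
-- ===== SOURCE A (Python) =====
-- from itertools import cycle
--
-- def expand_payloads(payloads, total):
--     if total is None or total <= len(payloads):
--         return payloads[: total or len(payloads)]
--     expanded = []
--     feeder = cycle(payloads)
--     while len(expanded) < total:
--         expanded.append(next(feeder))
--     return expanded
-- ===== SOURCE B (Python) =====
-- def expand_payloads(payloads, total):
--     if total is None or total <= len(payloads):
--         return payloads[: total or len(payloads)]
--     reps = -(-total // len(payloads))          # ceil(total / len)
--     return (payloads * reps)[:total]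
-- ===== Notes on version B (the rewrite author's own statement) =====
-- stated objective: simpler
-- what changed: Replaced the itertools.cycle feeder and per-element append loop with a closed-form construction: list multiplication by the ceiling repetition count followed by one slice.
import Mathlib
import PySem

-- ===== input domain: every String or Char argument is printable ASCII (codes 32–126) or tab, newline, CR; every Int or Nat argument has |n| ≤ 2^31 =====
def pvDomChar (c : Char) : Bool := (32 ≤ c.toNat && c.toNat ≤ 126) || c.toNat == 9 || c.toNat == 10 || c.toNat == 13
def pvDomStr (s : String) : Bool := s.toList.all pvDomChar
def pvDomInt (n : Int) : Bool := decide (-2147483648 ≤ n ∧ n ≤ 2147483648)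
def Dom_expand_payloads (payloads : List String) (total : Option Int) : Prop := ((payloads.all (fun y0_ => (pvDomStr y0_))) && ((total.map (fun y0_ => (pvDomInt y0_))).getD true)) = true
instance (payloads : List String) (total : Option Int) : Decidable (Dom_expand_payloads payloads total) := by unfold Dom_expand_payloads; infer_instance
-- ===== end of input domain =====

-- B replaces the itertools.cycle append loop with a closed-form construction: list
-- multiplication by the ceiling repetition count, then one slice (objective: simpler).

-- ===== PORT A =====
-- the 'while len(expanded) < total: expanded.append(next(feeder))' loop: n steps remain,
-- i is the cycle position, acc is 'expanded'
def pvCycleLoop (payloads : List String) : Nat → Nat → List String → List String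
  | 0, _, acc => acc
  | n+1, i, acc =>
      pvCycleLoop payloads n ((i + 1) % payloads.length) (acc ++ [payloads.getD i ""])

def expand_payloads (payloads : List String) (total : Option Int) : List String :=
  match total with
  | none =>
      -- total is None → payloads[: total or len(payloads)] = payloads[:len(payloads)]
      PySem.List.slice payloads none (some (payloads.length : Int))
  | some t =>
      if t ≤ (payloads.length : Int) then
        -- payloads[: total or len(payloads)] (total==0 is falsy → len(payloads))
        PySem.List.slice payloads none
          (some (if t = 0 then (payloads.length : Int) else t))
      else
        pvCycleLoop payloads t.toNat 0 []

-- ===== PORT B =====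
def expand_payloads_alt (payloads : List String) (total : Option Int) : List String :=
  match total with
  | none => PySem.List.slice payloads none (some (payloads.length : Int))
  | some t =>
      if t ≤ (payloads.length : Int) then
        PySem.List.slice payloads none
          (some (if t = 0 then (payloads.length : Int) else t))
      else
        -- reps = -(-total // len(payloads));  (payloads * reps)[:total]
        let reps : Int := -(PySem.Int.floordiv (-t) (payloads.length : Int))
        PySem.List.slice ((List.replicate reps.toNat payloads).flatten) none (some t)

-- ===== PRECONDITION & SPEC =====
-- Pre_ excludes empty payloads with a positive total: there A's next(cycle([])) raises
-- StopIteration (and B's division by len(payloads)=0 raises too).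
def Pre_expand_payloads (payloads : List String) (total : Option Int) : Prop :=
  payloads ≠ [] ∨ total.getD 0 ≤ 0
instance (payloads : List String) (total : Option Int) : Decidable (Pre_expand_payloads payloads total) := by unfold Pre_expand_payloads; infer_instance

def pvWitness_expand_payloads : List String × Option Int := (["a", "b"], some 5)

def Spec_expand_payloads (payloads : List String) (total : Option Int) (out : List String) : Prop := out = expand_payloads_alt payloads total
instance (payloads : List String) (total : Option Int) (out : List String) : Decidable (Spec_expand_payloads payloads total out) := by unfold Spec_expand_payloads; infer_instance

-- ===== CLAIM (what is proved, stated in full; the proofs are below) =====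
def Claim_equal_expand_payloads : Prop := ∀ (payloads : List String) (total : Option Int), Dom_expand_payloads payloads total → Pre_expand_payloads payloads total → Spec_expand_payloads payloads total (expand_payloads payloads total)

-- ===== LEMMAS AND PROOFS =====

-- the cycle loop produces the indices i, i+1, … reduced mod the length
theorem pvCycleLoop_eq (p : List String) (hp : 0 < p.length) :
    ∀ (n i : Nat) (acc : List String), i < p.length →
      pvCycleLoop p n i acc
        = acc ++ (List.range n).map (fun j => p.getD ((i + j) % p.length) "") := by
  intro n
  induction n with
  | zero => intro i acc _; simp [pvCycleLoop]
  | succ n ih =>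
    intro i acc hi
    rw [pvCycleLoop, ih ((i + 1) % p.length) _ (Nat.mod_lt _ hp)]
    rw [List.range_succ_eq_map]
    simp only [List.map_cons, List.map_map, List.append_assoc, List.cons_append,
      List.nil_append]
    congr 1
    congr 1
    · rw [Nat.add_zero, Nat.mod_eq_of_lt hi]
    · apply List.map_congr_left
      intro j _
      simp only [Function.comp]
      rw [Nat.mod_add_mod]
      congr 2
      omega

-- a list equals the map of getD over its index range
theorem pv_self_eq_map_range (p : List String) :
    (List.range p.length).map (fun j => p.getD j "") = p := by
  apply List.ext_getElem
  · simp
  · intro i h1 h2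
    simp [List.getD_eq_getElem?_getD, List.getElem?_eq_getElem h2]

-- flatten of r copies is the cyclic index map over r * length
theorem pv_flatten_replicate (p : List String) (r : Nat) :
    (List.replicate r p).flatten
      = (List.range (r * p.length)).map (fun j => p.getD (j % p.length) "") := by
  induction r with
  | zero => simp
  | succ r ih =>
    rw [List.replicate_succ', List.flatten_append, ih]
    have : (r + 1) * p.length = r * p.length + p.length := by ring
    rw [this, List.range_add, List.map_append]
    congr 1
    rw [List.map_map]
    conv_lhs => rw [← pv_self_eq_map_range p]
    simp only [List.flatten_cons, List.flatten_nil, List.append_nil]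
    apply List.map_congr_left
    intro j hj
    simp only [Function.comp]
    rw [List.mem_range] at hj
    congr 1
    rw [Nat.add_comm, Nat.add_mul_mod_self_right, Nat.mod_eq_of_lt hj]

-- enough copies: total ≤ reps * len when reps = ceil(total/len)
theorem pv_reps_enough (t : Int) (L : Nat) (hL : 0 < L) (ht : 0 < t) :
    t.toNat ≤ (-(PySem.Int.floordiv (-t) (L : Int))).toNat * L := by
  have hfd : PySem.Int.floordiv (-t) (L : Int) = (-t) / (L : Int) := by
    unfold PySem.Int.floordiv
    rw [Int.fdiv_eq_ediv]
    have hL' : (0:Int) ≤ (L : Int) := by positivity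
    simp [hL']
  have hmul : (-t) / (L : Int) * (L : Int) ≤ -t := Int.ediv_mul_le _ (by positivity)
  set q := (-t) / (L : Int) with hqdef
  have hq : q < 0 := by nlinarith
  have h1 : t ≤ (-q) * (L : Int) := by nlinarith
  have h2 : ((-q).toNat : Int) = -q := Int.toNat_of_nonneg (by omega)
  have : (t.toNat : Int) ≤ (((-q).toNat * L : Nat) : Int) := by
    push_cast
    rw [h2]
    omega
  rw [hfd]
  exact_mod_cast this

-- ===== VERDICT (by name: the statement is the Claim_ definition above) =====
theorem expand_payloads_spec : Claim_equal_expand_payloads := by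
  intro payloads total _ hpre
  unfold Spec_expand_payloads expand_payloads expand_payloads_alt
  match total with
  | none => rfl
  | some t =>
    by_cases hle : t ≤ (payloads.length : Int)
    · simp [hle]
    · simp only [hle, if_false]
      have hL : 0 < payloads.length := by
        rcases hpre with h | h
        · exact List.length_pos_of_ne_nil h
        · simp only [Option.getD_some] at h; omega
      have ht : 0 < t := by
        rw [not_le] at hle
        have : (0:Int) ≤ payloads.length := by positivity
        omega
      set reps : Int := -(PySem.Int.floordiv (-t) (payloads.length : Int)) with hreps
      have hcast : t = ((t.toNat : Nat) : Int) := by omega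
      rw [pvCycleLoop_eq payloads hL t.toNat 0 [] hL,
          pv_flatten_replicate payloads reps.toNat]
      rw [hcast, PySem.List.slice_to_natCast]
      rw [← List.map_take, List.take_range]
      have henough := pv_reps_enough t payloads.length hL ht
      rw [Nat.min_eq_left (by rw [hreps]; exact henough)]
      have hmx : (max t 0).toNat = t.toNat := by omega
      simp [List.getD_eq_getElem?_getD, hmx]
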